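-- pv_equiv track=rewrite | github.com/Nymphet/sexinsex-crawler | page_content_extractor.py | fuck
-- ===== SOURCE A (Python) =====
-- def fuck(s):
--     l = []
--     for c in s:
--         if c in r'''!@#$%^&*()+={}|[]\\:";'<>?,./【】：；‘’“”《》？／。，！@＃¥％……&＊（）——＋－＝｜、［］｛｝''':
--             pass
--         else:
--             l.append(c)
--     return ''.join(l)
-- ===== SOURCE B (Python) =====
-- _PUNCT = r'''!@#$%^&*()+={}|[]\\:";'<>?,./【】：；‘’“”《》？／。，！@＃¥％……&＊（）——＋－＝｜、［］｛｝'''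
--
--
-- def fuck(s):
--     # staged passes: delete one punctuation character per pass
--     for p in _PUNCT:
--         s = s.replace(p, '')
--     return s
-- ===== Notes on version B (the rewrite author's own statement) =====
-- stated objective: alternative
-- what changed: Instead of one char-by-char pass over s testing membership in the punctuation literal and appending survivors, B loops over the punctuation characters and deletes each with one whole-string str.replace pass (staged passes driven by the punctuation set).
import Mathlib
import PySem

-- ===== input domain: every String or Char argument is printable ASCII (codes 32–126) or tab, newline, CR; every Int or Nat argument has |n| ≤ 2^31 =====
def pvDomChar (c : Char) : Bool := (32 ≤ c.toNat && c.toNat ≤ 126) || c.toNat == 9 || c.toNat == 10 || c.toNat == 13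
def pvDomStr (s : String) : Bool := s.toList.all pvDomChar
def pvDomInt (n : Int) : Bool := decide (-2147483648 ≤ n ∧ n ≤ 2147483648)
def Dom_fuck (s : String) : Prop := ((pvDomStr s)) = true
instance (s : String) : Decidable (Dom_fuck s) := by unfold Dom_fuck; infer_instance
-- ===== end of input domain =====

-- B replaces A's single char-by-char membership scan with staged passes:
-- one s.replace(p, '') pass per punctuation character (alternative decomposition).

-- ===== PORT A =====
-- the punctuation literal of A, verbatim (the raw string contains two backslashes)
def fuckPunct : String := "!@#$%^&*()+={}|[]\\\\:\";'<>?,./【】：；‘’“”《》？／。，！@＃¥％……&＊（）——＋－＝｜、［］｛｝"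

def fuck (s : String) : String :=
  -- l = []; for c in s: if c in punct: pass else: l.append(c); return ''.join(l)
  String.ofList (s.toList.foldl (fun l c => if c ∈ fuckPunct.toList then l else l ++ [c]) [])

-- ===== PORT B =====
def fuck_alt (s : String) : String :=
  -- for p in _PUNCT: s = s.replace(p, ''); return s
  fuckPunct.toList.foldl (fun t p => PySem.Str.replace t (String.ofList [p]) "") s

-- ===== PRECONDITION & SPEC =====
def Spec_fuck (s : String) (out : String) : Prop := out = fuck_alt s
instance (s : String) (out : String) : Decidable (Spec_fuck s out) := by unfold Spec_fuck; infer_instance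

-- ===== CLAIM (what is proved, stated in full; the proofs are below) =====
def Claim_equal_fuck : Prop := ∀ (s : String), Dom_fuck s → Spec_fuck s (fuck s)

-- ===== LEMMAS AND PROOFS =====

-- deleting one character with replace is filtering it out
lemma replace_go_single (p : Char) (fuel : Nat) (l acc : List Char)
    (h : l.length ≤ fuel) :
    PySem.Chars.replace.go [p] [] fuel l acc
      = acc.reverse ++ l.filter (fun c => c ≠ p) := by
  induction fuel generalizing l acc with
  | zero =>
      interval_cases hl : l.length
      · simp [List.length_eq_zero_iff.mp hl, PySem.Chars.replace.go]
  | succ n ih =>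
      cases l with
      | nil => simp [PySem.Chars.replace.go]
      | cons c t =>
          simp only [PySem.Chars.replace.go, List.isPrefixOf, List.filter_cons]
          by_cases hc : c = p
          · subst hc
            simp only [BEq.rfl, Bool.true_and, if_true]
            rw [show List.drop [c].length (c :: t) = t from rfl,
                show ([] : List Char).reverse ++ acc = acc from rfl,
                ih t acc (by simpa using h)]
            simp
          · have hb : (p == c) = false := beq_eq_false_iff_ne.mpr (Ne.symm hc)
            simp only [hb, Bool.false_and]
            rw [ih t (c :: acc) (by simpa using h)]
            simp [hc]

lemma replace_single (p : Char) (l : List Char) :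
    PySem.Chars.replace l [p] [] = l.filter (fun c => c ≠ p) := by
  rw [PySem.Chars.replace]
  simp [replace_go_single p l.length l [] le_rfl]

-- the staged replace loop, read through toList
lemma foldl_replace_toList (ps : List Char) (s : String) :
    (ps.foldl (fun t p => PySem.Str.replace t (String.ofList [p]) "") s).toList
      = ps.foldl (fun l p => l.filter (fun c => c ≠ p)) s.toList := by
  induction ps generalizing s with
  | nil => rfl
  | cons p ps ih =>
      simp only [List.foldl_cons]
      rw [ih]
      congr 1
      simp [PySem.Str.toList_replace, String.toList_ofList, replace_single]

-- staged single-character filters = one filter by non-membership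
lemma foldl_filter_eq (ps : List Char) (l : List Char) :
    ps.foldl (fun l p => l.filter (fun c => c ≠ p)) l
      = l.filter (fun c => c ∉ ps) := by
  induction ps generalizing l with
  | nil => simp
  | cons p ps ih =>
      simp only [List.foldl_cons, ih, List.filter_filter]
      apply List.filter_congr
      intro c _
      by_cases h1 : c = p <;> simp [h1]

-- A's accumulator loop = one filter by non-membership
lemma fuck_foldl_filter (l acc : List Char) :
    l.foldl (fun l c => if c ∈ fuckPunct.toList then l else l ++ [c]) acc
      = acc ++ l.filter (fun c => c ∉ fuckPunct.toList) := by
  induction l generalizing acc with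
  | nil => simp
  | cons c l ih =>
      rw [List.foldl_cons, List.filter_cons]
      by_cases h : c ∈ fuckPunct.toList <;> simp [h, ih]

-- ===== VERDICT (by name: the statement is the Claim_ definition above) =====
theorem fuck_spec : Claim_equal_fuck := by
  intro s _
  show _ = _
  have h : (fuck s).toList = (fuck_alt s).toList := by
    rw [fuck, fuck_alt, foldl_replace_toList, foldl_filter_eq, fuck_foldl_filter]
    simp [String.toList_ofList]
  exact String.toList_injective h
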